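-- pv_equiv track=rewrite | github.com/alonelzb/BaiduImage_Service | baidu.py | decode_url
-- ===== SOURCE A (Python) =====
-- def decode_url(obj_url):
--     intab = '0123456789abcdefghijklmnopqrstuvw'
--     outab = '7dgjmoru140852vsnkheb963wtqplifca'
--     trans = obj_url.maketrans(intab, outab)
--     str_tab = {'_z2C$q': ':', '_z&e3B': '.', 'AzdH3F': '/'}
--     for k, v in str_tab.items():
--         obj_url = obj_url.replace(k, v)
--     url = obj_url.translate(trans)
--     return url
-- ===== SOURCE B (Python) =====
-- def decode_url(obj_url):
--     intab = '0123456789abcdefghijklmnopqrstuvw'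
--     outab = '7dgjmoru140852vsnkheb963wtqplifca'
--     trans = dict(zip(intab, outab))
--     str_tab = {'_z2C$q': ':', '_z&e3B': '.', 'AzdH3F': '/'}
--     out = []
--     i = 0
--     n = len(obj_url)
--     while i < n:
--         for k, v in str_tab.items():
--             if obj_url.startswith(k, i):
--                 out.append(v)
--                 i += len(k)
--                 break
--         else:
--             c = obj_url[i]
--             out.append(trans.get(c, c))
--             i += 1
--     return ''.join(out)
-- ===== Notes on version B (the rewrite author's own statement) =====
-- stated objective: alternative
-- what changed: Replaces A's three sequential full-string replace() passes plus a final translate() pass with a single left-to-right scan that, at each position, either emits the decoded token (':', '.', '/') and skips it, or emits the translated character.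
import Mathlib
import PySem

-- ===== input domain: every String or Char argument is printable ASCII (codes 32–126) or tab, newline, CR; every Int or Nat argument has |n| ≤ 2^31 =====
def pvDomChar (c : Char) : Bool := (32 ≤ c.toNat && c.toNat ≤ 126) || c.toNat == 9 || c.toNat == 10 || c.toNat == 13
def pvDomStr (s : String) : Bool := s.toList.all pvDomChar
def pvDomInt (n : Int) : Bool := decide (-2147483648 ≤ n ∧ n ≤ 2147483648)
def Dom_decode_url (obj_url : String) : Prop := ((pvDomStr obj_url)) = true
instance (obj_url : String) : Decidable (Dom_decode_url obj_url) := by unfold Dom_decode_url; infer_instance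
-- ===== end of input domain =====

-- B fuses A's three sequential replace() passes and final translate() into one left-to-right scan (alternative decomposition, same output).


-- ===== PORT A =====
-- shared table: trans = str.maketrans(intab, outab); translate maps a char through it, identity if absent
def pvIntab : List Char := "0123456789abcdefghijklmnopqrstuvw".toList
def pvOutab : List Char := "7dgjmoru140852vsnkheb963wtqplifca".toList
def pvTransChar (c : Char) : Char := ((pvIntab.zip pvOutab).lookup c).getD c

-- str_tab = {'_z2C$q': ':', '_z&e3B': '.', 'AzdH3F': '/'} (insertion order)
def pvStrTab : PySem.Dict String String :=
  ((PySem.Dict.empty.insert "_z2C$q" ":").insert "_z&e3B" ".").insert "AzdH3F" "/"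

def decode_url (obj_url : String) : String :=
  -- for k, v in str_tab.items(): obj_url = obj_url.replace(k, v)
  let replaced := pvStrTab.items.foldl (fun s kv => PySem.Str.replace s kv.1 kv.2) obj_url
  -- url = obj_url.translate(trans)
  String.ofList (replaced.toList.map pvTransChar)

-- ===== PORT B =====
def pvTok1 : List Char := "_z2C$q".toList
def pvTok2 : List Char := "_z&e3B".toList
def pvTok3 : List Char := "AzdH3F".toList

-- the single while-loop of Source B: try each token at the current position, else translate one char
def pvScan : List Char → List Char
  | [] => []
  | c :: rest =>
    if pvTok1.isPrefixOf (c :: rest) then ':' :: pvScan (rest.drop 5)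
    else if pvTok2.isPrefixOf (c :: rest) then '.' :: pvScan (rest.drop 5)
    else if pvTok3.isPrefixOf (c :: rest) then '/' :: pvScan (rest.drop 5)
    else pvTransChar c :: pvScan rest
termination_by l => l.length
decreasing_by all_goals simp

def decode_url_alt (obj_url : String) : String :=
  String.ofList (pvScan obj_url.toList)

-- ===== PRECONDITION & SPEC =====
def Spec_decode_url (obj_url : String) (out : String) : Prop := out = decode_url_alt obj_url
instance (obj_url : String) (out : String) : Decidable (Spec_decode_url obj_url out) := by unfold Spec_decode_url; infer_instance

-- ===== CLAIM (what is proved, stated in full; the proofs are below) =====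
def Claim_equal_decode_url : Prop := ∀ (obj_url : String), Dom_decode_url obj_url → Spec_decode_url obj_url (decode_url obj_url)

-- ===== LEMMAS AND PROOFS =====

-- a fuel-free restatement of PySem.Chars.replace for a nonempty pattern and the proof that it agrees
def pvRepl (old new : List Char) : List Char → List Char
  | [] => []
  | c :: t =>
    if old.isPrefixOf (c :: t) then new ++ pvRepl old new (t.drop (old.length - 1))
    else c :: pvRepl old new t
termination_by l => l.length
decreasing_by all_goals simp

theorem pvRepl_go (old new : List Char) (hold : old ≠ []) :
    ∀ (fuel : Nat) (l acc : List Char), l.length ≤ fuel →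
      PySem.Chars.replace.go old new fuel l acc = acc.reverse ++ pvRepl old new l := by
  intro fuel
  induction fuel with
  | zero =>
    intro l acc h
    have : l = [] := List.length_eq_zero_iff.mp (Nat.le_zero.mp h)
    subst this
    simp [PySem.Chars.replace.go, pvRepl]
  | succ n ih =>
    intro l acc h
    match l with
    | [] => simp [PySem.Chars.replace.go, pvRepl]
    | c :: t =>
      rw [PySem.Chars.replace.go]
      by_cases hp : old.isPrefixOf (c :: t)
      · have hdrop : (c :: t).drop old.length = t.drop (old.length - 1) := by
          cases old with
          | nil => exact absurd rfl hold
          | cons o os => simp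
        rw [if_pos hp, hdrop, ih _ _ (by simp at h ⊢; omega)]
        simp [pvRepl, hp]
      · rw [if_neg hp, ih _ _ (by simp at h ⊢; omega)]
        simp [pvRepl, hp]

theorem pvReplace_eq (old new l : List Char) (hold : old ≠ []) :
    PySem.Chars.replace l old new = pvRepl old new l := by
  rw [PySem.Chars.replace]
  rw [if_neg (by simpa using hold)]
  simpa using pvRepl_go old new hold l.length l [] le_rfl

-- replacing by a single char v not occurring in p cannot create a new occurrence of p at the front
theorem pvRepl_prefix_reflect (old : List Char) (v : Char) :
    ∀ (n : Nat) (p l : List Char), v ∉ p → l.length ≤ n →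
      p.isPrefixOf (pvRepl old [v] l) → p.isPrefixOf l := by
  intro n
  induction n with
  | zero =>
    intro p l hv hlen
    have : l = [] := List.length_eq_zero_iff.mp (Nat.le_zero.mp hlen)
    subst this
    simp [pvRepl]
  | succ n ih =>
    intro p l hv hlen
    match l with
    | [] => simp [pvRepl]
    | c :: t =>
      by_cases hp : old.isPrefixOf (c :: t)
      · rw [pvRepl, if_pos hp]
        intro hpre
        match p, hpre with
        | [], _ => simp [List.isPrefixOf]
        | q :: p', hpre =>
          simp [List.isPrefixOf] at hpre
          exact absurd (by simp [hpre.1.symm]) hv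
      · rw [pvRepl, if_neg hp]
        intro hpre
        match p, hpre with
        | [], _ => simp [List.isPrefixOf]
        | q :: p', hpre =>
          simp [List.isPrefixOf] at hpre ⊢
          exact ⟨hpre.1, List.isPrefixOf_iff_prefix.mp
            (ih p' t (by simp at hv; exact fun h => hv.2 h)
              (by simp at hlen; omega) (List.isPrefixOf_iff_prefix.mpr hpre.2))⟩

-- abbreviations for the three replace stages (A's pipeline on char lists)
def pvR1 (l : List Char) : List Char := pvRepl pvTok1 [':'] l
def pvR2 (l : List Char) : List Char := pvRepl pvTok2 ['.'] l
def pvR3 (l : List Char) : List Char := pvRepl pvTok3 ['/'] l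

-- the heart: A's three replace passes followed by translate equal B's single scan
theorem pvMain : ∀ (n : Nat) (l : List Char), l.length ≤ n →
    (pvR3 (pvR2 (pvR1 l))).map pvTransChar = pvScan l := by
  intro n
  induction n with
  | zero =>
    intro l h
    have : l = [] := List.length_eq_zero_iff.mp (Nat.le_zero.mp h)
    subst this
    simp [pvR1, pvR2, pvR3, pvRepl, pvScan]
  | succ n ih =>
    intro l hlen
    match l with
    | [] => simp [pvR1, pvR2, pvR3, pvRepl, pvScan]
    | c :: t =>
      by_cases h1 : pvTok1.isPrefixOf (c :: t)
      · -- '_z2C$q' at the front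
        obtain ⟨r, hr⟩ := List.isPrefixOf_iff_prefix.mp h1
        have hct : c :: t = '_' :: 'z' :: '2' :: 'C' :: '$' :: 'q' :: r := by
          rw [← hr]; rfl
        have hR1 : pvR1 (c :: t) = ':' :: pvR1 r := by
          rw [pvR1, hct, pvRepl, if_pos (by rw [← hct]; exact h1)]
          rfl
        have hR2 : pvR2 (':' :: pvR1 r) = ':' :: pvR2 (pvR1 r) := by
          rw [pvR2, pvRepl, if_neg (by simp [pvTok2, List.isPrefixOf])]
          rfl
        have hR3 : pvR3 (':' :: pvR2 (pvR1 r)) = ':' :: pvR3 (pvR2 (pvR1 r)) := by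
          rw [pvR3, pvRepl, if_neg (by simp [pvTok3, List.isPrefixOf])]
          rfl
        have hr5 : t.drop 5 = r := by
          have := congrArg (List.drop 6) hct
          simpa using this
        rw [hR1, hR2, hR3, pvScan, if_pos h1, hr5, List.map_cons,
            ih r (by have := congrArg List.length hct; simp at this hlen ⊢; omega)]
        rfl
      · by_cases h2 : pvTok2.isPrefixOf (c :: t)
        · obtain ⟨r, hr⟩ := List.isPrefixOf_iff_prefix.mp h2
          have hct : c :: t = '_' :: 'z' :: '&' :: 'e' :: '3' :: 'B' :: r := by
            rw [← hr]; rfl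
          have hR1 : pvR1 (c :: t) = '_' :: 'z' :: '&' :: 'e' :: '3' :: 'B' :: pvR1 r := by
            rw [hct]
            rw [pvR1, pvRepl, if_neg (by simp [pvTok1, List.isPrefixOf])]
            rw [pvRepl, if_neg (by simp [pvTok1, List.isPrefixOf])]
            rw [pvRepl, if_neg (by simp [pvTok1, List.isPrefixOf])]
            rw [pvRepl, if_neg (by simp [pvTok1, List.isPrefixOf])]
            rw [pvRepl, if_neg (by simp [pvTok1, List.isPrefixOf])]
            rw [pvRepl, if_neg (by simp [pvTok1, List.isPrefixOf])]
            rfl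
          have hR2 : pvR2 ('_' :: 'z' :: '&' :: 'e' :: '3' :: 'B' :: pvR1 r)
              = '.' :: pvR2 (pvR1 r) := by
            rw [pvR2, pvRepl, if_pos (by simp [pvTok2, List.isPrefixOf])]
            rfl
          have hR3 : pvR3 ('.' :: pvR2 (pvR1 r)) = '.' :: pvR3 (pvR2 (pvR1 r)) := by
            rw [pvR3, pvRepl, if_neg (by simp [pvTok3, List.isPrefixOf])]
            rfl
          have hr5 : t.drop 5 = r := by
            have := congrArg (List.drop 6) hct
            simpa using this
          rw [hR1, hR2, hR3, pvScan, if_neg h1, if_pos h2, hr5, List.map_cons,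
              ih r (by have := congrArg List.length hct; simp at this hlen ⊢; omega)]
          rfl
        · by_cases h3 : pvTok3.isPrefixOf (c :: t)
          · obtain ⟨r, hr⟩ := List.isPrefixOf_iff_prefix.mp h3
            have hct : c :: t = 'A' :: 'z' :: 'd' :: 'H' :: '3' :: 'F' :: r := by
              rw [← hr]; rfl
            have hR1 : pvR1 (c :: t) = 'A' :: 'z' :: 'd' :: 'H' :: '3' :: 'F' :: pvR1 r := by
              rw [hct]
              rw [pvR1, pvRepl, if_neg (by simp [pvTok1, List.isPrefixOf])]
              rw [pvRepl, if_neg (by simp [pvTok1, List.isPrefixOf])]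
              rw [pvRepl, if_neg (by simp [pvTok1, List.isPrefixOf])]
              rw [pvRepl, if_neg (by simp [pvTok1, List.isPrefixOf])]
              rw [pvRepl, if_neg (by simp [pvTok1, List.isPrefixOf])]
              rw [pvRepl, if_neg (by simp [pvTok1, List.isPrefixOf])]
              rfl
            have hR2 : pvR2 ('A' :: 'z' :: 'd' :: 'H' :: '3' :: 'F' :: pvR1 r)
                = 'A' :: 'z' :: 'd' :: 'H' :: '3' :: 'F' :: pvR2 (pvR1 r) := by
              rw [pvR2, pvRepl, if_neg (by simp [pvTok2, List.isPrefixOf])]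
              rw [pvRepl, if_neg (by simp [pvTok2, List.isPrefixOf])]
              rw [pvRepl, if_neg (by simp [pvTok2, List.isPrefixOf])]
              rw [pvRepl, if_neg (by simp [pvTok2, List.isPrefixOf])]
              rw [pvRepl, if_neg (by simp [pvTok2, List.isPrefixOf])]
              rw [pvRepl, if_neg (by simp [pvTok2, List.isPrefixOf])]
              rfl
            have hR3 : pvR3 ('A' :: 'z' :: 'd' :: 'H' :: '3' :: 'F' :: pvR2 (pvR1 r))
                = '/' :: pvR3 (pvR2 (pvR1 r)) := by
              rw [pvR3, pvRepl, if_pos (by simp [pvTok3, List.isPrefixOf])]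
              rfl
            have hr5 : t.drop 5 = r := by
              have := congrArg (List.drop 6) hct
              simpa using this
            rw [hR1, hR2, hR3, pvScan, if_neg h1, if_neg h2, if_pos h3, hr5, List.map_cons,
                ih r (by have := congrArg List.length hct; simp at this hlen ⊢; omega)]
            rfl
          · -- no token at the front: one ordinary character
            have hR1 : pvR1 (c :: t) = c :: pvR1 t := by
              rw [pvR1, pvRepl, if_neg h1]
              rfl
            have h2' : ¬ pvTok2.isPrefixOf (c :: pvR1 t) := by
              intro hcontra
              exact h2 (pvRepl_prefix_reflect pvTok1 ':' (c :: t).length pvTok2 _ (by decide) le_rfl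
                (by rw [← hR1] at hcontra; exact hcontra))
            have hR2 : pvR2 (c :: pvR1 t) = c :: pvR2 (pvR1 t) := by
              rw [pvR2, pvRepl, if_neg h2']
              rfl
            have h3' : ¬ pvTok3.isPrefixOf (c :: pvR2 (pvR1 t)) := by
              intro hcontra
              have step0 : pvTok3.isPrefixOf (pvR2 (pvR1 (c :: t))) := by
                rw [hR1, hR2]; exact hcontra
              have step1 : pvTok3.isPrefixOf (pvR1 (c :: t)) :=
                pvRepl_prefix_reflect pvTok2 '.' (pvR1 (c :: t)).length pvTok3 _
                  (by decide) le_rfl step0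
              exact h3 (pvRepl_prefix_reflect pvTok1 ':' (c :: t).length pvTok3 _
                (by decide) le_rfl step1)
            have hR3 : pvR3 (c :: pvR2 (pvR1 t)) = c :: pvR3 (pvR2 (pvR1 t)) := by
              rw [pvR3, pvRepl, if_neg h3']
              rfl
            rw [hR1, hR2, hR3, pvScan, if_neg h1, if_neg h2, if_neg h3, List.map_cons,
                ih t (by simp at hlen ⊢; omega)]

-- ===== VERDICT (by name: the statement is the Claim_ definition above) =====
theorem decode_url_spec : Claim_equal_decode_url := by
  intro s _
  unfold Spec_decode_url decode_url decode_url_alt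
  have hitems : pvStrTab.items = [("_z2C$q", ":"), ("_z&e3B", "."), ("AzdH3F", "/")] := rfl
  rw [hitems]
  simp only [List.foldl]
  refine congrArg String.ofList ?_
  rw [PySem.Str.toList_replace, PySem.Str.toList_replace, PySem.Str.toList_replace]
  rw [pvReplace_eq _ _ _ (by decide), pvReplace_eq _ _ _ (by decide),
      pvReplace_eq _ _ _ (by decide)]
  exact pvMain s.toList.length s.toList le_rfl
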